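-- pv_equiv track=rewrite | github.com/nidugin/algorithms-genetic-optimization | box.py | detect_groups
-- ===== SOURCE A (Python) =====
-- def detect_groups(data):
--     groups = []
--     current_group = []
--     for i in range(len(data)):
--         if data[i] > 0:
--             current_group.append(i)
--         else:
--             if current_group:
--                 groups.append(current_group)
--             current_group = []
--     if current_group:
--         groups.append(current_group)
--     return groups
-- ===== SOURCE B (Python) =====
-- def detect_groups(data):
--     n = len(data)
--     groups = []
--     i = 0
--     while i < n:
--         if data[i] > 0:
--             j = i
--             while j < n and data[j] > 0:
--                 j += 1
--             groups.append(list(range(i, j)))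
--             i = j
--         else:
--             i += 1
--     return groups
-- ===== Notes on version B (the rewrite author's own statement) =====
-- stated objective: alternative
-- what changed: Replaces the append-to-current-group/flush accumulator with a two-pointer run scanner that finds the end of each positive run and emits list(range(i, j)) directly, so no per-element group accumulation or final flush exists.
import Mathlib
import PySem

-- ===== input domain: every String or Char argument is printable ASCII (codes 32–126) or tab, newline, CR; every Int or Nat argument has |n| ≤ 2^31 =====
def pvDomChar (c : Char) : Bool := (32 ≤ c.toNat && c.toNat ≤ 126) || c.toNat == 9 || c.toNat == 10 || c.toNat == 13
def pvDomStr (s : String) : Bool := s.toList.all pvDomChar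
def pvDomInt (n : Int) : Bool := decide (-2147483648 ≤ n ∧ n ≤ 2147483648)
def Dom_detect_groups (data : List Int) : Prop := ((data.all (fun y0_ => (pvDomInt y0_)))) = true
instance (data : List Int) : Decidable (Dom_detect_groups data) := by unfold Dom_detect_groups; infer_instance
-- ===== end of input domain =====

-- B replaces A's per-element group accumulator and flush logic with a two-pointer run
-- scanner emitting each positive run as range(i, j); same cost, different structure (alternative).

-- ===== PORT A =====
def detect_groups (data : List Int) : List (List Int) :=
  let r := (PySem.List.pyRange 0 (data.length : Int) 1).foldl
    (fun (st : List (List Int) × List Int) i =>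
      if PySem.List.pyGetD data i 0 > 0 then (st.1, st.2 ++ [i])
      else if st.2 ≠ [] then (st.1 ++ [st.2], ([] : List Int)) else (st.1, []))
    ([], [])
  if r.2 ≠ [] then r.1 ++ [r.2] else r.1

-- ===== PORT B =====
-- inner while loop of Source B: advance j while j < n and data[j] > 0
def dgRunEnd (data : List Int) (j : Nat) : Nat :=
  if h : j < data.length then
    if 0 < data[j] then dgRunEnd data (j + 1) else j
  else j
termination_by data.length - j

theorem dgRunEnd_ge (data : List Int) (j : Nat) : j ≤ dgRunEnd data j := by
  rw [dgRunEnd]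
  split
  · split
    · exact le_trans (Nat.le_succ j) (dgRunEnd_ge data (j + 1))
    · exact le_refl j
  · exact le_refl j
termination_by data.length - j

theorem dgRunEnd_gt (data : List Int) (j : Nat) (h : j < data.length) (hp : 0 < data[j]) :
    j < dgRunEnd data j := by
  rw [dgRunEnd]
  simp only [dif_pos h, if_pos hp]
  exact lt_of_lt_of_le (Nat.lt_succ_self j) (dgRunEnd_ge data (j + 1))

-- outer while loop of Source B
def dgGo (data : List Int) (i : Nat) : List (List Int) :=
  if h : i < data.length then
    if hp : 0 < data[i] then
      PySem.List.pyRange (i : Int) (dgRunEnd data i : Int) 1 :: dgGo data (dgRunEnd data i)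
    else dgGo data (i + 1)
  else []
termination_by data.length - i
decreasing_by
  · have := dgRunEnd_gt data i h hp; omega
  · omega

def detect_groups_alt (data : List Int) : List (List Int) := dgGo data 0

-- ===== PRECONDITION & SPEC =====
def Spec_detect_groups (data : List Int) (out : List (List Int)) : Prop := out = detect_groups_alt data
instance (data : List Int) (out : List (List Int)) : Decidable (Spec_detect_groups data out) := by unfold Spec_detect_groups; infer_instance

-- ===== CLAIM (what is proved, stated in full; the proofs are below) =====
def Claim_equal_detect_groups : Prop := ∀ (data : List Int), Dom_detect_groups data → Spec_detect_groups data (detect_groups data)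

-- ===== LEMMAS AND PROOFS =====

-- canonical recursive description both ports are reduced to
def dgSpec : List Int → Int → List Int → List (List Int)
  | [], _, cur => if cur = [] then [] else [cur]
  | x :: xs, i, cur =>
    if 0 < x then dgSpec xs (i + 1) (cur ++ [i])
    else (if cur = [] then [] else [cur]) ++ dgSpec xs (i + 1) []

def dgStep (data : List Int) (st : List (List Int) × List Int) (i : Int) : List (List Int) × List Int :=
  if PySem.List.pyGetD data i 0 > 0 then (st.1, st.2 ++ [i])
  else if st.2 ≠ [] then (st.1 ++ [st.2], ([] : List Int)) else (st.1, [])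

def dgFinish (r : List (List Int) × List Int) : List (List Int) :=
  if r.2 ≠ [] then r.1 ++ [r.2] else r.1

theorem detect_groups_eq_fold (data : List Int) :
    detect_groups data =
      dgFinish ((PySem.List.pyRange 0 (data.length : Int) 1).foldl (dgStep data) ([], [])) := rfl

theorem detect_groups_eq_spec_aux (data : List Int) :
    ∀ (k m : Nat), data.length - m ≤ k → ∀ (gs : List (List Int)) (cur : List Int),
    dgFinish ((PySem.List.pyRange (m : Int) (data.length : Int) 1).foldl (dgStep data) (gs, cur)) =
      gs ++ dgSpec (data.drop m) (m : Int) cur := by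
  intro k
  induction k with
  | zero =>
    intro m hm gs cur
    have hm' : data.length ≤ m := by omega
    rw [PySem.List.pyRange_one_eq_nil (by exact_mod_cast hm')]
    rw [List.drop_eq_nil_of_le hm']
    simp only [List.foldl_nil, dgSpec, dgFinish]
    by_cases hc : cur = [] <;> simp [hc]
  | succ k ih =>
    intro m hm gs cur
    by_cases h : m < data.length
    · rw [PySem.List.pyRange_one_cons (by exact_mod_cast h)]
      rw [List.drop_eq_getElem_cons h]
      rw [List.foldl_cons]
      have hget : PySem.List.pyGetD data (m : Int) 0 = data[m] := by
        rw [PySem.List.pyGetD_natCast]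
        exact List.getD_eq_getElem data 0 h
      by_cases hp : 0 < data[m]
      · have hstep : dgStep data (gs, cur) (m : Int) = (gs, cur ++ [(m : Int)]) := by
          simp [dgStep, hget, hp]
        rw [hstep]
        simp only [dgSpec, if_pos hp]
        have := ih (m + 1) (by omega) gs (cur ++ [(m : Int)])
        push_cast at this ⊢
        exact this
      · by_cases hc : cur = []
        · have hstep : dgStep data (gs, cur) (m : Int) = (gs, []) := by
            simp [dgStep, hget, hp, hc]
          rw [hstep]
          simp only [dgSpec, if_neg hp, hc, List.nil_append]
          have := ih (m + 1) (by omega) gs []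
          push_cast at this
          exact this
        · have hstep : dgStep data (gs, cur) (m : Int) = (gs ++ [cur], []) := by
            simp [dgStep, hget, hp, hc]
          rw [hstep]
          simp only [dgSpec, if_neg hp, if_neg hc]
          have := ih (m + 1) (by omega) (gs ++ [cur]) []
          push_cast at this ⊢
          rw [this]
          simp
    · have hm' : data.length ≤ m := by omega
      rw [PySem.List.pyRange_one_eq_nil (by exact_mod_cast hm')]
      rw [List.drop_eq_nil_of_le hm']
      simp only [List.foldl_nil, dgSpec, dgFinish]
      by_cases hc : cur = [] <;> simp [hc]

theorem detect_groups_eq_spec (data : List Int) : detect_groups data = dgSpec data 0 [] := by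
  rw [detect_groups_eq_fold]
  have := detect_groups_eq_spec_aux data data.length 0 (by omega) [] []
  simpa using this

-- a nonempty current group, read at index i, ends exactly at dgRunEnd data i
theorem dgSpec_run (data : List Int) :
    ∀ (k i : Nat), data.length - i ≤ k → ∀ (cur : List Int), cur ≠ [] →
    dgSpec (data.drop i) (i : Int) cur =
      (cur ++ PySem.List.pyRange (i : Int) (dgRunEnd data i : Int) 1)
        :: dgSpec (data.drop (dgRunEnd data i)) (dgRunEnd data i : Int) [] := by
  intro k
  induction k with
  | zero =>
    intro i hi cur hc
    have hi' : data.length ≤ i := by omega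
    have he : dgRunEnd data i = i := by rw [dgRunEnd]; simp [Nat.not_lt.mpr hi']
    rw [he, List.drop_eq_nil_of_le hi', PySem.List.pyRange_one_eq_nil (le_refl _)]
    simp [dgSpec, hc]
  | succ k ih =>
    intro i hi cur hc
    by_cases h : i < data.length
    · rw [List.drop_eq_getElem_cons h]
      by_cases hp : 0 < data[i]
      · have he : dgRunEnd data i = dgRunEnd data (i + 1) := by
          rw [dgRunEnd]; simp [h, hp]
        simp only [dgSpec, if_pos hp]
        have := ih (i + 1) (by omega) (cur ++ [(i : Int)]) (by simp)
        push_cast at this ⊢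
        rw [this, he]
        have hlt : (i : Int) < (dgRunEnd data (i + 1) : Int) := by
          have := dgRunEnd_ge data (i + 1); exact_mod_cast Nat.lt_of_lt_of_le (Nat.lt_succ_self i) this
        rw [PySem.List.pyRange_one_cons hlt]
        simp
      · have he : dgRunEnd data i = i := by rw [dgRunEnd]; simp [h, hp]
        rw [he, PySem.List.pyRange_one_eq_nil (le_refl _)]
        simp only [dgSpec, if_neg hp, hc, List.append_nil]
        rw [List.drop_eq_getElem_cons h]
        simp [dgSpec, hp]
    · have hi' : data.length ≤ i := by omega
      have he : dgRunEnd data i = i := by rw [dgRunEnd]; simp [Nat.not_lt.mpr hi']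
      rw [he, List.drop_eq_nil_of_le hi', PySem.List.pyRange_one_eq_nil (le_refl _)]
      simp [dgSpec, hc]

theorem dgGo_eq_spec (data : List Int) :
    ∀ (k i : Nat), data.length - i ≤ k → dgGo data i = dgSpec (data.drop i) (i : Int) [] := by
  intro k
  induction k with
  | zero =>
    intro i hi
    have hi' : data.length ≤ i := by omega
    rw [dgGo, List.drop_eq_nil_of_le hi']
    simp [Nat.not_lt.mpr hi', dgSpec]
  | succ k ih =>
    intro i hi
    by_cases h : i < data.length
    · rw [dgGo]
      rw [List.drop_eq_getElem_cons h]
      by_cases hp : 0 < data[i]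
      · simp only [dif_pos h, dif_pos hp]
        have he : dgRunEnd data i = dgRunEnd data (i + 1) := by
          rw [dgRunEnd]; simp [h, hp]
        have hgt := dgRunEnd_gt data i h hp
        simp only [dgSpec, if_pos hp, List.nil_append]
        have hrun := dgSpec_run data k (i + 1) (by omega) [(i : Int)] (by simp)
        push_cast at hrun
        rw [hrun, ← he]
        have hgo := ih (dgRunEnd data i) (by omega)
        rw [hgo]
        have hlt : (i : Int) < (dgRunEnd data i : Int) := by exact_mod_cast hgt
        rw [PySem.List.pyRange_one_cons hlt]
        simp
      · simp only [dif_pos h, dif_neg hp]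
        have := ih (i + 1) (by omega)
        push_cast at this ⊢
        simp [dgSpec, hp, this]
    · have hi' : data.length ≤ i := by omega
      rw [dgGo, List.drop_eq_nil_of_le hi']
      simp [Nat.not_lt.mpr hi', dgSpec]

-- ===== VERDICT (by name: the statement is the Claim_ definition above) =====
theorem detect_groups_spec : Claim_equal_detect_groups := by
  intro data _
  unfold Spec_detect_groups detect_groups_alt
  rw [detect_groups_eq_spec data, dgGo_eq_spec data data.length 0 (by omega)]
  simp
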